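-- pv_equiv track=rewrite | github.com/drewchandler/magic-worlds-metagame | scripts/analyze.py | get_player_archetype
-- ===== SOURCE A (Python) =====
-- from typing import Dict, List, Tuple
--
-- def normalize_player_name(name: str) -> str:
--     """Normalize player name for matching - handles both 'First Last' and 'Last, First' formats"""
--     import unicodedata
--
--     name = name.strip()
--     if not name:
--         return ''
--
--     # Remove accents/diacritics for better matching
--     nfd = unicodedata.normalize('NFD', name)
--     name = ''.join(c for c in nfd if unicodedata.category(c) != 'Mn')
--
--     # If it's in "Last, First" format, convert to "First Last"
--     if ',' in name:
--         parts = [p.strip() for p in name.split(',')]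
--         if len(parts) == 2:
--             # Convert "Last, First" to "First Last"
--             name = f"{parts[1]} {parts[0]}"
--         elif len(parts) > 2:
--             # Handle "Last, First Middle" format
--             name = f"{' '.join(parts[1:])} {parts[0]}"
--
--     # Normalize to lowercase and remove extra spaces
--     return ' '.join(name.lower().split())
--
-- def get_player_archetype(player_name: str, decklists: Dict) -> str:
--     """Get archetype for a player"""
--     normalized = normalize_player_name(player_name)
--     if not normalized:
--         return 'Unknown'
--
--     # Try exact match first
--     for decklist in decklists.values():
--         decklist_player = normalize_player_name(decklist.get('player', ''))
--         if decklist_player == normalized: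
--             return decklist.get('archetype', 'Unknown')
--
--     # Try matching by last name (for cases with middle names, etc.)
--     # Extract last name from normalized name
--     name_parts = normalized.split()
--     if len(name_parts) >= 2:
--         last_name = name_parts[-1]
--         for decklist in decklists.values():
--             decklist_player = normalize_player_name(decklist.get('player', ''))
--             decklist_parts = decklist_player.split()
--             if len(decklist_parts) >= 2 and decklist_parts[-1] == last_name:
--                 # Also check first name matches
--                 if name_parts[0] == decklist_parts[0]:
--                     return decklist.get('archetype', 'Unknown')
--
--     # Try partial match as fallback
--     for decklist in decklists.values():
--         decklist_player = normalize_player_name(decklist.get('player', ''))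
--         if normalized in decklist_player or decklist_player in normalized:
--             return decklist.get('archetype', 'Unknown')
--
--     return 'Unknown'
-- ===== SOURCE B (Python) =====
-- def normalize_player_name(name: str) -> str:
--     """Normalize player name for matching - handles both 'First Last' and 'Last, First' formats"""
--     import unicodedata
--
--     name = name.strip()
--     if not name:
--         return ''
--
--     nfd = unicodedata.normalize('NFD', name)
--     name = ''.join(c for c in nfd if unicodedata.category(c) != 'Mn')
--
--     if ',' in name:
--         parts = [p.strip() for p in name.split(',')]
--         if len(parts) == 2:
--             name = f"{parts[1]} {parts[0]}"
--         elif len(parts) > 2: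
--             name = f"{' '.join(parts[1:])} {parts[0]}"
--
--     return ' '.join(name.lower().split())
--
--
-- def get_player_archetype(player_name: str, decklists) -> str:
--     """Get archetype for a player (single pass, three first-hit slots)."""
--     normalized = normalize_player_name(player_name)
--     if not normalized:
--         return 'Unknown'
--
--     name_parts = normalized.split()
--     have_last = len(name_parts) >= 2
--
--     exact = by_last = partial = None
--     for decklist in decklists.values():
--         dp = normalize_player_name(decklist.get('player', ''))
--         arch = decklist.get('archetype', 'Unknown')
--         if exact is None and dp == normalized:
--             exact = arch
--         if by_last is None and have_last:
--             dparts = dp.split()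
--             if len(dparts) >= 2 and dparts[-1] == name_parts[-1] and dparts[0] == name_parts[0]:
--                 by_last = arch
--         if partial is None and (normalized in dp or dp in normalized):
--             partial = arch
--
--     if exact is not None:
--         return exact
--     if by_last is not None:
--         return by_last
--     if partial is not None:
--         return partial
--     return 'Unknown'
-- ===== Notes on version B (the rewrite author's own statement) =====
-- stated objective: simpler
-- what changed: Replaces A's three sequential scans over decklists (exact, last-name, partial) by a single pass that keeps three first-hit slots and picks them by priority afterwards.
import Mathlib
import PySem

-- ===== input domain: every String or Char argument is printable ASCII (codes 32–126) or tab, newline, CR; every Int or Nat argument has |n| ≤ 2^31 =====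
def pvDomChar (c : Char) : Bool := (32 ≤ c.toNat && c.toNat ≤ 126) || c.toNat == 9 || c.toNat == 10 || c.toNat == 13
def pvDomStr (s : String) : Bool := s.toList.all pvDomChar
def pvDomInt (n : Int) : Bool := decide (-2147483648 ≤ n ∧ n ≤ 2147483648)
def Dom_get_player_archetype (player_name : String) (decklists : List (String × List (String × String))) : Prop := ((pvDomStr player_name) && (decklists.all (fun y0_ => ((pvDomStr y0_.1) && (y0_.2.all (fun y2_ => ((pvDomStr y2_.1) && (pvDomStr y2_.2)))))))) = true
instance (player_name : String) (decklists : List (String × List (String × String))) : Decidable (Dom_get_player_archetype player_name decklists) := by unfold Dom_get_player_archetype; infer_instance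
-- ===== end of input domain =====

-- B is a single pass over the decklists keeping three first-hit slots instead of A's three
-- separate scans; same return value everywhere (objective: simpler decomposition, same cost).

-- ===== PORT A =====
-- shared module-level helper normalize_player_name (Source B contains the identical helper).
-- The NFD/remove-Mn accent-stripping step is the IDENTITY on the printable-ASCII domain
-- (no ASCII char is category Mn and NFD leaves ASCII unchanged), so it is ported as identity;
-- exact on Dom_get_player_archetype.
def pvNormalize (name : String) : String :=
  let name := PySem.Str.strip name
  if name = "" then ""
  else
    let name :=
      if PySem.Str.isIn "," name then
        let parts := ((PySem.Str.split? name ",").getD []).map PySem.Str.strip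
        if parts.length = 2 then
          PySem.Str.join " " [parts.getD 1 "", parts.getD 0 ""]
        else if parts.length > 2 then
          PySem.Str.join " " [PySem.Str.join " " (parts.drop 1), parts.getD 0 ""]
        else name
      else name
    PySem.Str.join " " (PySem.Str.split₀ (PySem.Str.lower name))

-- decklist.get(key, default) on the inner dict (first-match association-list lookup)
def pvGetD (d : List (String × String)) (k dflt : String) : String :=
  (PySem.Dict.mk d).getD k dflt

def pvPlayer (d : List (String × String)) : String :=
  pvNormalize (pvGetD d "player" "")

def pvArch (d : List (String × String)) : String :=
  pvGetD d "archetype" "Unknown"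

-- A's first loop: exact match
def pvScan1 (normalized : String) : List (String × List (String × String)) → Option String
  | [] => none
  | (_, d) :: rest =>
      if pvPlayer d = normalized then some (pvArch d) else pvScan1 normalized rest

-- A's second loop: last-name match with nested first-name check
def pvScan2 (last_name first_name : String) : List (String × List (String × String)) → Option String
  | [] => none
  | (_, d) :: rest =>
      let dparts := PySem.Str.split₀ (pvPlayer d)
      if dparts.length ≥ 2 ∧ dparts.getLastD "" = last_name then
        if dparts.getD 0 "" = first_name then some (pvArch d)
        else pvScan2 last_name first_name rest
      else pvScan2 last_name first_name rest

-- A's third loop: partial (substring) match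
def pvScan3 (normalized : String) : List (String × List (String × String)) → Option String
  | [] => none
  | (_, d) :: rest =>
      if PySem.Str.isIn normalized (pvPlayer d) = true ∨ PySem.Str.isIn (pvPlayer d) normalized = true
      then some (pvArch d) else pvScan3 normalized rest

def get_player_archetype (player_name : String) (decklists : List (String × List (String × String))) : String :=
  let normalized := pvNormalize player_name
  if normalized = "" then "Unknown"
  else
    match pvScan1 normalized decklists with
    | some a => a
    | none =>
      let name_parts := PySem.Str.split₀ normalized
      let r2 :=
        if name_parts.length ≥ 2 then
          pvScan2 (name_parts.getLastD "") (name_parts.getD 0 "") decklists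
        else none
      match r2 with
      | some a => a
      | none =>
        match pvScan3 normalized decklists with
        | some a => a
        | none => "Unknown"

-- ===== PORT B =====
-- single pass: fold over the decklists carrying (exact, by_last, partial) first-hit slots
def pvStep (normalized : String) (name_parts : List String) (have_last : Bool)
    (st : Option String × Option String × Option String)
    (entry : String × List (String × String)) :
    Option String × Option String × Option String :=
  let dp := pvPlayer entry.2
  let arch := pvArch entry.2
  let exact := if st.1.isNone ∧ dp = normalized then some arch else st.1
  let byLast :=
    if st.2.1.isNone ∧ have_last = true ∧
        (let dparts := PySem.Str.split₀ dp
         dparts.length ≥ 2 ∧ dparts.getLastD "" = name_parts.getLastD "" ∧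
           dparts.getD 0 "" = name_parts.getD 0 "")
    then some arch else st.2.1
  let part :=
    if st.2.2.isNone ∧ (PySem.Str.isIn normalized dp = true ∨ PySem.Str.isIn dp normalized = true)
    then some arch else st.2.2
  (exact, byLast, part)

def get_player_archetype_alt (player_name : String) (decklists : List (String × List (String × String))) : String :=
  let normalized := pvNormalize player_name
  if normalized = "" then "Unknown"
  else
    let name_parts := PySem.Str.split₀ normalized
    let have_last : Bool := decide (name_parts.length ≥ 2)
    let st := decklists.foldl (pvStep normalized name_parts have_last) (none, none, none)
    match st.1 with
    | some a => a
    | none =>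
      match st.2.1 with
      | some a => a
      | none =>
        match st.2.2 with
        | some a => a
        | none => "Unknown"

-- ===== PRECONDITION & SPEC =====
def Spec_get_player_archetype (player_name : String) (decklists : List (String × List (String × String))) (out : String) : Prop := out = get_player_archetype_alt player_name decklists
instance (player_name : String) (decklists : List (String × List (String × String))) (out : String) : Decidable (Spec_get_player_archetype player_name decklists out) := by unfold Spec_get_player_archetype; infer_instance

-- ===== CLAIM (what is proved, stated in full; the proofs are below) =====
def Claim_equal_get_player_archetype : Prop := ∀ (player_name : String) (decklists : List (String × List (String × String))), Dom_get_player_archetype player_name decklists → Spec_get_player_archetype player_name decklists (get_player_archetype player_name decklists)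

-- ===== LEMMAS AND PROOFS =====

-- the fold computes, slot by slot, "first value already held, else the corresponding scan's result"
lemma pvFold_eq (normalized : String) (name_parts : List String) (have_last : Bool)
    (dls : List (String × List (String × String)))
    (e b p : Option String) :
    dls.foldl (pvStep normalized name_parts have_last) (e, b, p) =
      (e.or (pvScan1 normalized dls),
       b.or (if have_last then
               pvScan2 (name_parts.getLastD "") (name_parts.getD 0 "") dls
             else none),
       p.or (pvScan3 normalized dls)) := by
  induction dls generalizing e b p with
  | nil => simp [pvScan1, pvScan2, pvScan3]
  | cons hd tl ih =>
    obtain ⟨k, d⟩ := hd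
    simp only [List.foldl_cons, pvStep]
    rw [ih]
    refine Prod.ext ?_ (Prod.ext ?_ ?_)
    · -- exact slot
      cases e with
      | some v => simp
      | none =>
        simp only [Option.isNone_none, true_and, Option.none_or, pvScan1]
        split_ifs with h <;> simp
    · -- by-last slot
      cases b with
      | some v => simp
      | none =>
        cases hl : have_last with
        | false => simp
        | true =>
          simp only [Option.isNone_none, true_and, Option.none_or, if_true, pvScan2]
          split_ifs <;> simp_all
    · -- partial slot
      cases p with
      | some v => simp
      | none =>
        simp only [Option.isNone_none, true_and, Option.none_or, pvScan3]
        split_ifs with h <;> simp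

-- ===== VERDICT (by name: the statement is the Claim_ definition above) =====
theorem get_player_archetype_spec : Claim_equal_get_player_archetype := by
  intro pn dls _
  unfold Spec_get_player_archetype get_player_archetype get_player_archetype_alt
  by_cases h : pvNormalize pn = ""
  · simp [h]
  · simp only [if_neg h]
    rw [pvFold_eq]
    simp only [Option.none_or, decide_eq_true_eq]
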